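-- pv_equiv track=rewrite | github.com/Lujan-84/Proyecto_Integrador | Stark_00/funciones.py | maximo_segun_clave
-- ===== SOURCE A (Python) =====
-- def maximo_segun_clave(lista:list,key:str)->list:
--     """Recibe una lista de diccionarios y una clave, determina el maximo valor en la lista en relación a
--        la clave solicitada, devuelve una lista con los personajes que tengan el máximo valor encontrado.
--
--     Args:
--         lista (list): Lista con personajes a analizar
--         key (str): Clave en relación a la cuál se desea determinar el máximo
--
--     Returns:
--         list: Lista con los personajes que tengan el máximo valor de la clave recibida
--     """
--     maximo = lista[0][key]
--     for i in range(len(lista)):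
--         valor = lista[i][key]
--         if valor > maximo:
--             maximo = lista[i][key]
--
--     lista_maximos = []
--     for i in range(len(lista)):
--         personaje = lista[i]
--         valor = lista[i][key]
--         if valor == maximo:
--             lista_maximos.append(personaje)
--     return lista_maximos
-- ===== SOURCE B (Python) =====
-- def maximo_segun_clave(lista: list, key: str) -> list:
--     """Single pass: track the running maximum and the list of dicts achieving it."""
--     maximo = lista[0][key]
--     lista_maximos = []
--     for personaje in lista:
--         valor = personaje[key]
--         if valor > maximo:
--             maximo = valor
--             lista_maximos = [personaje]
--         elif valor == maximo:
--             lista_maximos.append(personaje)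
--     return lista_maximos
-- ===== Notes on version B (the rewrite author's own statement) =====
-- stated objective: alternative
-- what changed: A makes two passes (first compute the maximum, then filter the list for it); B makes one pass maintaining the running maximum together with the list of dicts achieving it, resetting the list whenever a larger value appears.
import Mathlib
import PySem

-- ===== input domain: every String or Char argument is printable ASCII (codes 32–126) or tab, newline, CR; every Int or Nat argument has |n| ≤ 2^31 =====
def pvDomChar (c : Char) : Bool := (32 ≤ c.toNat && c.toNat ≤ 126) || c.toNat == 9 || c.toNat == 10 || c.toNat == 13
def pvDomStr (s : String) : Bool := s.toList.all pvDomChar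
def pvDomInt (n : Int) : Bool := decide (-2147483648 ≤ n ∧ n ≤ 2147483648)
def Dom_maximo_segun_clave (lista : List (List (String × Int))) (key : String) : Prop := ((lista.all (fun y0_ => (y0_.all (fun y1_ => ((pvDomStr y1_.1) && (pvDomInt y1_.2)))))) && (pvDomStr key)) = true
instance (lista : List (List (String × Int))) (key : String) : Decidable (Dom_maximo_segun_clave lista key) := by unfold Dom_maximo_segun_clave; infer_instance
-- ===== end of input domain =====

-- B folds A's two passes (compute max, then filter) into one pass that maintains the
-- running maximum together with the list of dicts achieving it (alternative decomposition).


-- ===== PORT A =====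
-- dict lookup d[key]: first matching pair; the 0 default is unreachable inside Pre_
-- (where Python would raise KeyError / IndexError)
def dget (d : List (String × Int)) (key : String) : Int :=
  match d.find? (fun p => p.1 == key) with
  | some p => p.2
  | none => 0

def maximo_segun_clave (lista : List (List (String × Int))) (key : String) : List (List (String × Int)) :=
  -- maximo = lista[0][key]; first for-loop updating maximo
  let maximo : Int := dget (lista.headD []) key
  let maximo : Int := lista.foldl (fun m d =>
      let valor := dget d key
      if valor > m then dget d key else m) maximo
  -- second for-loop collecting the dicts whose value equals maximo
  lista.foldl (fun acc d =>
      let valor := dget d key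
      if valor = maximo then acc ++ [d] else acc) []

-- ===== PORT B =====
def maximo_segun_clave_alt (lista : List (List (String × Int))) (key : String) : List (List (String × Int)) :=
  let maximo : Int := dget (lista.headD []) key
  let st := lista.foldl (fun (s : Int × List (List (String × Int))) personaje =>
      let valor := dget personaje key
      if valor > s.1 then (valor, [personaje])
      else if valor = s.1 then (s.1, s.2 ++ [personaje])
      else s) (maximo, [])
  st.2

-- ===== PRECONDITION & SPEC =====
-- Pre_ excludes exactly the inputs where Python A raises: the empty list (IndexError on
-- lista[0]) and lists with a dict lacking the key (KeyError); B raises identically there.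
def Pre_maximo_segun_clave (lista : List (List (String × Int))) (key : String) : Prop :=
  lista ≠ [] ∧ ∀ d ∈ lista, key ∈ d.map Prod.fst
instance (lista : List (List (String × Int))) (key : String) : Decidable (Pre_maximo_segun_clave lista key) := by unfold Pre_maximo_segun_clave; infer_instance

def pvWitness_maximo_segun_clave : (List (List (String × Int))) × String :=
  ([[("hp", 5), ("mp", 2)], [("hp", 5)], [("hp", 3)]], "hp")

def Spec_maximo_segun_clave (lista : List (List (String × Int))) (key : String) (out : List (List (String × Int))) : Prop := out = maximo_segun_clave_alt lista key
instance (lista : List (List (String × Int))) (key : String) (out : List (List (String × Int))) : Decidable (Spec_maximo_segun_clave lista key out) := by unfold Spec_maximo_segun_clave; infer_instance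

-- ===== CLAIM (what is proved, stated in full; the proofs are below) =====
def Claim_equal_maximo_segun_clave : Prop := ∀ (lista : List (List (String × Int))) (key : String), Dom_maximo_segun_clave lista key → Pre_maximo_segun_clave lista key → Spec_maximo_segun_clave lista key (maximo_segun_clave lista key)

-- ===== LEMMAS AND PROOFS =====

-- A's first loop, as a function of the remaining list and the running maximum
def runMax (key : String) (l : List (List (String × Int))) (m : Int) : Int :=
  l.foldl (fun m d => let valor := dget d key; if valor > m then dget d key else m) m

lemma runMax_cons (key : String) (d : List (String × Int)) (t : List (List (String × Int))) (m : Int) :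
    runMax key (d :: t) m = runMax key t (if dget d key > m then dget d key else m) := by
  simp [runMax, List.foldl]

lemma le_runMax (key : String) (l : List (List (String × Int))) (m : Int) : m ≤ runMax key l m := by
  induction l generalizing m with
  | nil => simp [runMax]
  | cons d t ih =>
    rw [runMax_cons]
    split
    · exact le_trans (le_of_lt (by assumption)) (ih _)
    · exact ih _

-- A's second loop is a filter
lemma foldl_filter (key : String) (M : Int) (l : List (List (String × Int))) (acc : List (List (String × Int))) :
    l.foldl (fun acc d => let valor := dget d key; if valor = M then acc ++ [d] else acc) acc
      = acc ++ l.filter (fun d => dget d key = M) := by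
  induction l generalizing acc with
  | nil => simp
  | cons d t ih =>
    simp only [List.foldl, List.filter]
    by_cases h : dget d key = M <;> simp [h, ih]

-- invariant of B's single pass
lemma altFold_inv (key : String) (l : List (List (String × Int))) (m : Int) (res : List (List (String × Int))) :
    l.foldl (fun (s : Int × List (List (String × Int))) personaje =>
        let valor := dget personaje key
        if valor > s.1 then (valor, [personaje])
        else if valor = s.1 then (s.1, s.2 ++ [personaje])
        else s) (m, res)
      = (runMax key l m,
         (if runMax key l m = m then res else []) ++ l.filter (fun d => dget d key = runMax key l m)) := by
  induction l generalizing m res with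
  | nil => simp [runMax]
  | cons d t ih =>
    have hM : runMax key (d :: t) m = runMax key t (if dget d key > m then dget d key else m) :=
      runMax_cons key d t m
    simp only [List.foldl, List.filter]
    by_cases h1 : dget d key > m
    · -- reset: new running max is the value of d
      rw [ih]
      have hMv : runMax key (d :: t) m = runMax key t (dget d key) := by
        rw [hM, if_pos h1]
      have hle : dget d key ≤ runMax key t (dget d key) := le_runMax _ _ _
      have hne : runMax key (d :: t) m ≠ m := by
        rw [hMv]; intro he; omega
      rw [if_pos h1]
      have hne1 : ¬ dget d key = m := by omega
      have hne2 : ¬ runMax key t (dget d key) = m := by omega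
      by_cases h2 : runMax key t (dget d key) = dget d key
      · simp [hMv, h2, hne1]
      · have hdm : ¬ (dget d key = runMax key t (dget d key)) := fun he => h2 he.symm
        simp [hMv, h2, hdm, hne2]
    · rw [if_neg h1]
      have hMm : runMax key (d :: t) m = runMax key t m := by
        rw [hM, if_neg h1]
      by_cases h2 : dget d key = m
      · rw [if_pos h2, ih]
        have hle : m ≤ runMax key t m := le_runMax _ _ _
        by_cases h3 : runMax key t m = m
        · simp [hMm, h3, h2]
        · have hdm : ¬ (dget d key = runMax key t m) := by rw [h2]; exact fun he => h3 he.symm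
          simp [hMm, h3, hdm]
      · rw [if_neg h2, ih]
        have hdm : ¬ (dget d key = runMax key (d :: t) m) := by
          rw [hMm]
          intro he
          have := le_runMax key t m
          rcases lt_or_eq_of_le this with hlt | heq
          · omega
          · exact h2 (by omega)
        simp [hMm] at hdm ⊢
        simp [hdm]

lemma ab_equal (lista : List (List (String × Int))) (key : String) :
    maximo_segun_clave lista key = maximo_segun_clave_alt lista key := by
  unfold maximo_segun_clave maximo_segun_clave_alt
  simp only []
  rw [altFold_inv]
  rw [foldl_filter]
  split <;> simp [runMax]

-- ===== VERDICT (by name: the statement is the Claim_ definition above) =====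
theorem maximo_segun_clave_spec : Claim_equal_maximo_segun_clave := by
  intro lista key _ _
  unfold Spec_maximo_segun_clave
  exact ab_equal lista key
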